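-- pv_equiv track=rewrite | github.com/yaglm/yaglm | ya_glm/config/penalty_utils.py | get_ancestor_keys
-- ===== SOURCE A (Python) =====
-- def get_ancestor_keys(key, candidates):
--     """
--     Gets all ancestors for a key among a list of candidates.
--
--     Parameters
--     ----------
--     key: str
--         The keys who ancestors we want.
--
--     candidates: list of str
--         The candidate ancestors.
--
--     Output
--     ------
--     ancestors: list of str
--         The ancestors ordered so that the oldest ancestors come first.
--     """
--     # drop any duplicates
--     candidates = list(dict.fromkeys(candidates))
--
--     # pull out all ancestors
--     ancestors = []
--     for maybe_ancestor in candidates: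
--         # a key startes with all its ancestors
--         if key.startswith(maybe_ancestor):
--             ancestors.append(maybe_ancestor)
--
--     # order ancestors so the oldest ancestors come first
--     ancestors = sorted(ancestors, key=lambda s: len(s))
--
--     return ancestors
-- ===== SOURCE B (Python) =====
-- def get_ancestor_keys(key, candidates):
--     """Collect the candidates that are prefixes of key, oldest (shortest) first.
--
--     Every ancestor of key is the prefix key[:l] for some length l, so it
--     suffices to probe one prefix per distinct candidate length: take the
--     distinct candidate lengths not exceeding len(key) in increasing order
--     and keep each prefix key[:l] found among the candidates.  Ascending
--     lengths yield the ancestors already ordered oldest-first.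
--     """
--     pool = set(candidates)
--     lengths = sorted({len(c) for c in pool if len(c) <= len(key)})
--     ancestors = []
--     for l in lengths:
--         p = key[:l]
--         if p in pool:
--             ancestors.append(p)
--     return ancestors
-- ===== Notes on version B (the rewrite author's own statement) =====
-- stated objective: alternative
-- what changed: B builds a set of the candidates and probes key's prefixes at the sorted distinct candidate lengths (ascending), instead of A's startswith scan over the deduplicated candidates followed by a length sort; ascending lengths already yield the oldest-first order because distinct ancestors have distinct lengths.
import Mathlib
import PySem

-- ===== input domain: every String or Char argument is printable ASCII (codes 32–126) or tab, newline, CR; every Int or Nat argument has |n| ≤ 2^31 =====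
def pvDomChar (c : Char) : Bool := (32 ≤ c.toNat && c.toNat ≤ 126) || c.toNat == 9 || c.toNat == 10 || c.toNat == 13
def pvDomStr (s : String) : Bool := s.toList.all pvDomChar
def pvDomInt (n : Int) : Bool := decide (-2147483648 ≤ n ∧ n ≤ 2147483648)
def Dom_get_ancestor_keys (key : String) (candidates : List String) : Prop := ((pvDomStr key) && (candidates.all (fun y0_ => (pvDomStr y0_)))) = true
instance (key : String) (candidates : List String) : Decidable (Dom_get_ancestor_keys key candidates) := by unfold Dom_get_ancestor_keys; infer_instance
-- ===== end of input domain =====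

-- B probes key's prefixes at the distinct candidate lengths (ascending) against a set of the
-- candidates, replacing A's startswith scan of the deduplicated candidates and its length sort.

-- ===== PORT A =====
def get_ancestor_keys (key : String) (candidates : List String) : List String :=
  -- candidates = list(dict.fromkeys(candidates))
  let candidates := PySem.List.dedup candidates
  -- ancestors = []; for maybe_ancestor in candidates: if key.startswith(maybe_ancestor): append
  let ancestors := candidates.foldl
    (fun acc maybe_ancestor =>
      if PySem.Str.startswith key maybe_ancestor then acc ++ [maybe_ancestor] else acc) []
  -- ancestors = sorted(ancestors, key=lambda s: len(s))
  PySem.List.sorted ancestors (fun s => (PySem.Str.len s : Int)) false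

-- ===== PORT B =====
def get_ancestor_keys_alt (key : String) (candidates : List String) : List String :=
  -- pool = set(candidates)
  let pool : PySem.Set String := PySem.Set.ofList candidates
  -- lengths = sorted({len(c) for c in pool if len(c) <= len(key)})
  let lengths := PySem.List.sorted
    (PySem.Set.ofList ((pool.filter (fun c => PySem.Str.len c ≤ PySem.Str.len key)).map PySem.Str.len))
    (fun x => x) false
  -- ancestors = []; for l in lengths: p = key[:l]; if p in pool: append
  lengths.foldl
    (fun ancestors l =>
      let p := PySem.Str.slice key none (some l)
      if PySem.Set.contains pool p then ancestors ++ [p] else ancestors) []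

-- ===== PRECONDITION & SPEC =====
def Spec_get_ancestor_keys (key : String) (candidates : List String) (out : List String) : Prop := out = get_ancestor_keys_alt key candidates
instance (key : String) (candidates : List String) (out : List String) : Decidable (Spec_get_ancestor_keys key candidates out) := by unfold Spec_get_ancestor_keys; infer_instance

-- ===== CLAIM (what is proved, stated in full; the proofs are below) =====
def Claim_equal_get_ancestor_keys : Prop := ∀ (key : String) (candidates : List String), Dom_get_ancestor_keys key candidates → Spec_get_ancestor_keys key candidates (get_ancestor_keys key candidates)

-- ===== LEMMAS AND PROOFS =====

-- B's sorted distinct-lengths list, named for the proofs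
def pvLens (key : String) (cands : List String) : List Int :=
  PySem.List.sorted
    (PySem.Set.ofList (((PySem.Set.ofList cands).filter
        (fun c => PySem.Str.len c ≤ PySem.Str.len key)).map PySem.Str.len))
    (fun x => x) false

-- key[:l] for 0 ≤ l is the take of the character list
theorem pv_slice_take (key : String) (l : Int) (h : 0 ≤ l) :
    (PySem.Str.slice key none (some l)).toList = key.toList.take l.toNat := by
  obtain ⟨m, rfl⟩ : ∃ m : Nat, l = (m : Int) := ⟨l.toNat, (Int.toNat_of_nonneg h).symm⟩
  simp [PySem.Str.slice, PySem.List.slice_to_natCast]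

-- len(key[:l]) = l for 0 ≤ l ≤ len(key)
theorem pv_len_slice (key : String) (l : Int) (h0 : 0 ≤ l) (h1 : l ≤ (key.toList.length : Int)) :
    PySem.Str.len (PySem.Str.slice key none (some l)) = l := by
  rw [PySem.Str.len_eq, pv_slice_take key l h0, List.length_take]
  omega

theorem pv_mem_lens (key : String) (cands : List String) (l : Int) :
    l ∈ pvLens key cands ↔
      (∃ c ∈ cands, PySem.Str.len c = l) ∧ 0 ≤ l ∧ l ≤ (key.toList.length : Int) := by
  unfold pvLens
  rw [PySem.List.mem_sorted]
  simp only [PySem.Set.mem_ofList, List.mem_map, List.mem_filter, decide_eq_true_eq]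
  constructor
  · rintro ⟨c, ⟨hc, hle⟩, rfl⟩
    rw [PySem.Str.len_eq] at *
    exact ⟨⟨c, hc, by rw [PySem.Str.len_eq]⟩, by positivity, hle⟩
  · rintro ⟨⟨c, hc, rfl⟩, -, hle⟩
    exact ⟨c, ⟨hc, hle⟩, rfl⟩

theorem pv_pairwise_lens (key : String) (cands : List String) :
    (pvLens key cands).Pairwise (· < ·) := by
  have hperm := PySem.List.sorted_perm
    (xs := PySem.Set.ofList (((PySem.Set.ofList cands).filter
        (fun c => PySem.Str.len c ≤ PySem.Str.len key)).map PySem.Str.len))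
    (key := fun x => x) (rev := false)
  have hnd : (pvLens key cands).Nodup := hperm.nodup_iff.mpr (PySem.Set.nodup_ofList _)
  have hle : (pvLens key cands).Pairwise (fun a b => a ≤ b) :=
    PySem.List.sorted_pairwise _ _
  exact (hle.and hnd).imp (fun {a b} h => lt_of_le_of_ne h.1 h.2)

-- membership in B's output list (in its filter/map normal form)
theorem pv_mem_B (key : String) (cands : List String) (m : String) :
    m ∈ ((pvLens key cands).filter
          (fun l => PySem.Set.contains (PySem.Set.ofList cands) (PySem.Str.slice key none (some l)))).map
          (fun l => PySem.Str.slice key none (some l))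
      ↔ m ∈ cands ∧ PySem.Str.startswith key m = true := by
  simp only [List.mem_map, List.mem_filter]
  constructor
  · rintro ⟨l, ⟨hl, hc⟩, rfl⟩
    obtain ⟨-, h0, hle⟩ := (pv_mem_lens key cands l).mp hl
    simp only [PySem.Set.contains_iff, PySem.Set.mem_ofList] at hc
    refine ⟨hc, ?_⟩
    rw [PySem.Str.startswith_eq, PySem.Chars.startswith_iff, pv_slice_take key l h0]
    exact List.take_prefix _ _
  · rintro ⟨hm, hs⟩
    have hpfx : m.toList <+: key.toList := by
      rw [PySem.Str.startswith_eq, PySem.Chars.startswith_iff] at hs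
      exact hs
    have hfix : PySem.Str.slice key none (some (m.toList.length : Int)) = m := by
      apply String.toList_inj.mp
      rw [pv_slice_take key _ (by positivity), Int.toNat_natCast]
      exact (List.prefix_iff_eq_take.mp hpfx).symm
    refine ⟨(m.toList.length : Int), ⟨?_, ?_⟩, hfix⟩
    · exact (pv_mem_lens key cands _).mpr
        ⟨⟨m, hm, by rw [PySem.Str.len_eq]⟩, by positivity, by exact_mod_cast hpfx.length_le⟩
    · simp only [PySem.Set.contains_iff, PySem.Set.mem_ofList]
      rw [hfix]; exact hm

-- B's output list is strictly increasing in length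
theorem pv_pairwise_B (key : String) (cands : List String) :
    (((pvLens key cands).filter
          (fun l => PySem.Set.contains (PySem.Set.ofList cands) (PySem.Str.slice key none (some l)))).map
          (fun l => PySem.Str.slice key none (some l))).Pairwise
      (fun a b => (PySem.Str.len a : Int) < (PySem.Str.len b : Int)) := by
  rw [List.pairwise_map]
  have h := (pv_pairwise_lens key cands).filter
      (fun l => PySem.Set.contains (PySem.Set.ofList cands) (PySem.Str.slice key none (some l)))
  refine h.imp_of_mem ?_
  intro i j hi hj hlt
  obtain ⟨-, hi0, hile⟩ := (pv_mem_lens key cands i).mp (List.mem_filter.mp hi).1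
  obtain ⟨-, hj0, hjle⟩ := (pv_mem_lens key cands j).mp (List.mem_filter.mp hj).1
  rw [pv_len_slice key i hi0 hile, pv_len_slice key j hj0 hjle]
  exact hlt

theorem pv_main (key : String) (cands : List String) :
    get_ancestor_keys key cands = get_ancestor_keys_alt key cands := by
  unfold get_ancestor_keys get_ancestor_keys_alt
  dsimp only
  rw [PySem.List.foldl_append_if_eq_filter]
  rw [show (fun (anc : List String) (l : Int) =>
        let p := PySem.Str.slice key none (some l)
        if PySem.Set.contains (PySem.Set.ofList cands) p then anc ++ [p] else anc)
      = (fun anc l => if PySem.Set.contains (PySem.Set.ofList cands) (PySem.Str.slice key none (some l))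
          then anc ++ [PySem.Str.slice key none (some l)] else anc) from rfl]
  rw [PySem.List.foldl_append_if
        (p := fun l => PySem.Set.contains (PySem.Set.ofList cands) (PySem.Str.slice key none (some l)))
        (f := fun l => PySem.Str.slice key none (some l))]
  simp only [List.nil_append]
  rw [show PySem.List.sorted
        (PySem.Set.ofList (((PySem.Set.ofList cands).filter
            (fun c => PySem.Str.len c ≤ PySem.Str.len key)).map PySem.Str.len))
        (fun x => x) false = pvLens key cands from rfl]
  apply PySem.List.sorted_eq_of_perm_of_pairwise_lt
  · -- permutation: both lists are nodup with the same members
    have hA : ((PySem.List.dedup cands).filter (fun m => PySem.Str.startswith key m)).Nodup :=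
      (PySem.List.nodup_dedup cands).filter _
    have hB : (((pvLens key cands).filter
          (fun l => PySem.Set.contains (PySem.Set.ofList cands) (PySem.Str.slice key none (some l)))).map
          (fun l => PySem.Str.slice key none (some l))).Nodup :=
      (pv_pairwise_B key cands).imp
        (fun {a b} h hab => absurd (hab ▸ h) (lt_irrefl _))
    refine (List.perm_ext_iff_of_nodup hB hA).mpr ?_
    intro m
    rw [List.mem_filter, PySem.List.mem_dedup]
    exact (pv_mem_B key cands m).trans (by simp)
  · exact pv_pairwise_B key cands

-- ===== VERDICT (by name: the statement is the Claim_ definition above) =====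
theorem get_ancestor_keys_spec : Claim_equal_get_ancestor_keys := by
  intro key cands _
  exact pv_main key cands
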